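-- pv_equiv track=rewrite | github.com/songsongha/adventOfCode | 2025/Day 2/solutions.py | check_for_match_part2
-- ===== SOURCE A (Python) =====
-- def check_for_match_part2(id:int):
--     id_str = str(id)
--     length = len(id_str)
--     for chunk_size in range(1, length):
--         if length % chunk_size == 0:  # must divide evenly
--             chunk = id_str[:chunk_size]
--             if chunk * (length // chunk_size) == id_str:
--                 return True
--     return False
-- ===== SOURCE B (Python) =====
-- def check_for_match_part2(id: int):
--     s = str(id)
--     return s in (s + s)[1:-1]
-- ===== Notes on version B (the rewrite author's own statement) =====
-- stated objective: alternative
-- what changed: Replaces the loop over candidate chunk sizes (building and comparing a repeated chunk for each divisor of the digit count) with the classic rotation trick: s is a repetition of a proper block iff s occurs in (s+s)[1:-1], a single substring search with no explicit loop.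
import Mathlib
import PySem

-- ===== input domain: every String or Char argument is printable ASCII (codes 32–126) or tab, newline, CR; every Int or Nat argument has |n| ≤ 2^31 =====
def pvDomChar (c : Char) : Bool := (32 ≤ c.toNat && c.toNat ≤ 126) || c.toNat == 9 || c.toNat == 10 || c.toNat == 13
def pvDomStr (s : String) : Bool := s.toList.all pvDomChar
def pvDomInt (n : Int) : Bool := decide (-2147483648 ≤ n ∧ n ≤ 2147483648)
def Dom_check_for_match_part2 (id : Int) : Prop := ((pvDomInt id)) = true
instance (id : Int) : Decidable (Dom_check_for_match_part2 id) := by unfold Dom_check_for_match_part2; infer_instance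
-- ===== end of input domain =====

-- B replaces A's loop over candidate chunk sizes by the classic rotation trick
-- (s is a repetition of a proper block iff s occurs in (s+s)[1:-1]): a single substring search.


-- ===== PORT A =====
def check_for_match_part2 (id : Int) : Bool :=
  let id_str := PySem.Int.toChars id
  let length : Int := id_str.length
  (PySem.List.pyRange 1 length 1).foldl (fun found chunk_size =>
    found ||
      (PySem.Int.mod length chunk_size == 0 &&
        (let chunk := PySem.List.slice id_str none (some chunk_size)
         PySem.List.pyRepeat chunk (PySem.Int.floordiv length chunk_size) == id_str)))
    false

-- ===== PORT B =====
def check_for_match_part2_alt (id : Int) : Bool :=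
  let s := PySem.Int.toChars id
  PySem.Chars.isIn s (PySem.List.slice (s ++ s) (some 1) (some (-1)))

-- ===== PRECONDITION & SPEC =====
def Spec_check_for_match_part2 (id : Int) (out : Bool) : Prop := out = check_for_match_part2_alt id
instance (id : Int) (out : Bool) : Decidable (Spec_check_for_match_part2 id out) := by unfold Spec_check_for_match_part2; infer_instance

-- ===== CLAIM (what is proved, stated in full; the proofs are below) =====
def Claim_equal_check_for_match_part2 : Prop := ∀ (id : Int), Dom_check_for_match_part2 id → Spec_check_for_match_part2 id (check_for_match_part2 id)

-- ===== LEMMAS AND PROOFS =====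

-- str(id) is never the empty string
lemma toChars_ne_nil (id : Int) : PySem.Int.toChars id ≠ [] := by
  unfold PySem.Int.toChars
  split
  · simp
  · exact List.ne_nil_of_length_pos Nat.length_toDigits_pos

-- a Bool-fold of 'acc || p x' is List.any
lemma foldl_or_any {α : Type} (p : α → Bool) (L : List α) (b : Bool) :
    L.foldl (fun acc x => acc || p x) b = (b || L.any p) := by
  induction L generalizing b with
  | nil => simp
  | cons x xs ih => simp [List.any_cons, ih, Bool.or_assoc]

lemma flat_length (m : Nat) (cs : List Char) :
    ((List.replicate m cs).flatten).length = m * cs.length := by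
  simp [List.length_flatten, List.map_replicate, List.sum_replicate]

-- element j of a flattened replicate is element j % |chunk| of the chunk
lemma flat_getElem (m : Nat) (cs : List Char) (j : Nat) (hc : 0 < cs.length) (h : j < m * cs.length) :
    ((List.replicate m cs).flatten)[j]'(by rw [flat_length]; omega) =
      cs[j % cs.length]'(Nat.mod_lt _ hc) := by
  induction m generalizing j with
  | zero => omega
  | succ m ih =>
    have e : (List.replicate (m+1) cs).flatten = cs ++ (List.replicate m cs).flatten := by
      rw [List.replicate_succ, List.flatten_cons]
    rw [getElem_congr_coll e, List.getElem_append]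
    split
    · next h' => exact getElem_congr_idx (Nat.mod_eq_of_lt h').symm
    · next h' =>
      have h'' : cs.length ≤ j := by omega
      have hm : (m+1) * cs.length = m * cs.length + cs.length := by ring
      rw [ih (j - cs.length) (by omega)]
      exact getElem_congr_idx (Nat.mod_eq_sub_mod h'').symm

-- invariance under rotation by g gives a plain period g
lemma period_of_rotate (l : List Char) (g : Nat) (h : l.rotate g = l) :
    ∀ j, (hj : j + g < l.length) → l[j + g]'hj = l[j]'(by omega) := by
  intro j hj
  have hb : j < (l.rotate g).length := by rw [h]; omega
  calc l[j+g]'hj = l[(j+g) % l.length]'(Nat.mod_lt _ (by omega)) :=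
        getElem_congr_idx (Nat.mod_eq_of_lt hj).symm
    _ = (l.rotate g)[j]'hb := (List.getElem_rotate l g j hb).symm
    _ = l[j]'(by omega) := getElem_congr_coll h

-- a plain period g propagates down to index j % g
lemma getElem_mod_period (l : List Char) (g : Nat) (hg : 0 < g)
    (hp : ∀ j, (hj : j + g < l.length) → l[j + g]'hj = l[j]'(by omega)) :
    ∀ j, (hj : j < l.length) → l[j]'hj = l[j % g]'(by have := Nat.mod_le j g; omega) := by
  intro j
  induction j using Nat.strong_induction_on with
  | _ j ih =>
    intro hj
    by_cases hjg : j < g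
    · exact getElem_congr_idx (Nat.mod_eq_of_lt hjg).symm
    · have hjg' : g ≤ j := by omega
      have h2 : (j - g) + g < l.length := by omega
      have hmod : (j - g) % g = j % g := by
        conv_rhs => rw [show j = (j - g) + g by omega, Nat.add_mod_right]
      calc l[j]'hj = l[(j-g)+g]'h2 := getElem_congr_idx (by omega)
        _ = l[j-g]'(by omega) := hp (j - g) h2
        _ = l[(j-g) % g]'(by have := Nat.mod_le (j-g) g; omega) := ih (j - g) (by omega) (by omega)
        _ = l[j % g]'(by have := Nat.mod_le j g; omega) := getElem_congr_idx hmod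

-- Bezout: some multiple of i hits gcd n i modulo n
lemma exists_mul_mod_eq_gcd (n i : Nat) (hi : 0 < i) (hlt : i < n) :
    ∃ k : Nat, (i * k) % n = Nat.gcd n i := by
  have hn : 0 < n := by omega
  have hg := Int.gcd_eq_gcd_ab (n : Int) (i : Int)
  set A := Int.gcdA (n : Int) (i : Int) with hA
  set B := Int.gcdB (n : Int) (i : Int) with hB
  have hglt : Nat.gcd n i < n := lt_of_le_of_lt (Nat.gcd_le_right _ hi) hlt
  have hnz : (n : Int) ≠ 0 := by exact_mod_cast hn.ne'
  have h0 : (0:Int) ≤ B % n := Int.emod_nonneg _ hnz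
  refine ⟨(B % (n:Int)).toNat, ?_⟩
  have hcast : (((B % (n:Int)).toNat : Int)) = B % n := Int.toNat_of_nonneg h0
  have key : ((i:Int) * (B % n)) % n = ((Nat.gcd n i : Nat) : Int) := by
    have e1 : ((i:Int) * (B % n)) % n = ((i:Int) * B) % n := by
      rw [Int.mul_emod, Int.emod_emod_of_dvd _ (dvd_refl (n:Int)), ← Int.mul_emod]
    have e2 : (i:Int) * B = ((Nat.gcd n i : Nat) : Int) - (n:Int) * A := by
      simp only [Int.gcd_natCast_natCast] at hg
      linarith [hg]
    rw [e1, e2]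
    rw [Int.sub_emod, Int.mul_emod_right]
    simp
    exact Int.emod_eq_of_lt (by positivity) (by exact_mod_cast hglt)
  have : ((i * (B % (n:Int)).toNat) % n : Nat) = ((Nat.gcd n i : Nat)) := by
    have := key
    rw [← hcast] at this
    exact_mod_cast this
  exact this

-- invariance under rotation by i gives invariance under rotation by gcd(n, i)
lemma rotate_gcd (l : List Char) (i : Nat) (hi : 0 < i) (hlt : i < l.length)
    (h : l.rotate i = l) : l.rotate (Nat.gcd l.length i) = l := by
  have hpow : ∀ k, l.rotate (i * k) = l := by
    intro k
    induction k with
    | zero => simp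
    | succ k ih =>
      have : i * (k+1) = i * k + i := by ring
      rw [this, ← List.rotate_rotate, ih, h]
  obtain ⟨k, hk⟩ := exists_mul_mod_eq_gcd l.length i hi hlt
  rw [← hk, List.rotate_mod, hpow]

-- rotation-invariance by a divisor d makes l a repetition of its d-prefix
lemma rep_of_rotate (l : List Char) (d : Nat) (hd : 0 < d) (hdvd : d ∣ l.length)
    (h : l.rotate d = l) : (List.replicate (l.length / d) (l.take d)).flatten = l := by
  rcases Nat.eq_zero_or_pos l.length with h0 | h0
  · have : l = [] := List.eq_nil_of_length_eq_zero h0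
    simp [this]
  have hdn : d ≤ l.length := Nat.le_of_dvd h0 hdvd
  have hcs : (l.take d).length = d := by simp [List.length_take]; omega
  have hmul : (l.length / d) * (l.take d).length = l.length := by
    rw [hcs]; exact Nat.div_mul_cancel hdvd
  apply List.ext_getElem
  · rw [flat_length, hmul]
  · intro j h1 h2
    rw [flat_getElem _ _ _ (by omega) (by omega)]
    have e1 : (l.take d)[j % (l.take d).length]'(Nat.mod_lt _ (by omega)) =
        l[j % (l.take d).length]'(by have h3 : j % (l.take d).length < (l.take d).length := Nat.mod_lt _ (by omega); omega) :=
      List.getElem_take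
    rw [e1]
    have e2 := getElem_mod_period l d hd (period_of_rotate l d h) j h2
    rw [e2]
    exact getElem_congr_idx (by rw [hcs])

-- conversely, a repetition of the d-prefix is invariant under rotation by d
lemma rotate_of_rep (l : List Char) (d : Nat) (hd : 0 < d) (hdn : d ≤ l.length) (hdvd : d ∣ l.length)
    (h : (List.replicate (l.length / d) (l.take d)).flatten = l) : l.rotate d = l := by
  have hcs : (l.take d).length = d := by simp [List.length_take]; omega
  have hmul : (l.length / d) * (l.take d).length = l.length := by
    rw [hcs]; exact Nat.div_mul_cancel hdvd
  have hlel : ∀ x, (hx : x < l.length) →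
      l[x]'hx = (l.take d)[x % d]'(by rw [hcs]; exact Nat.mod_lt _ hd) := by
    intro x hx
    have e0 : l[x]'hx = ((List.replicate (l.length / d) (l.take d)).flatten)[x]'(by rw [flat_length]; omega) :=
      getElem_congr_coll h.symm
    rw [e0, flat_getElem _ _ _ (by omega) (by omega)]
    exact getElem_congr_idx (by rw [hcs])
  apply List.ext_getElem
  · simp
  · intro j h1 h2
    rw [List.getElem_rotate]
    rw [hlel ((j + d) % l.length) (Nat.mod_lt _ (by omega)), hlel j h2]
    apply getElem_congr_idx
    rw [Nat.mod_mod_of_dvd _ hdvd, Nat.add_mod_right]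

-- A's loop, characterised: some proper divisor's chunk repeats to the whole string
lemma portA_iff (id : Int) :
    check_for_match_part2 id = true ↔
      ∃ d : Nat, 0 < d ∧ d < (PySem.Int.toChars id).length ∧ d ∣ (PySem.Int.toChars id).length ∧
        (List.replicate ((PySem.Int.toChars id).length / d) ((PySem.Int.toChars id).take d)).flatten = PySem.Int.toChars id := by
  set l := PySem.Int.toChars id with hl
  set n := l.length with hn
  show ((PySem.List.pyRange 1 (n:Int) 1).foldl _ false = true) ↔ _
  rw [foldl_or_any (fun chunk_size =>
      (PySem.Int.mod (n:Int) chunk_size == 0 &&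
        (PySem.List.pyRepeat (PySem.List.slice l none (some chunk_size)) (PySem.Int.floordiv (n:Int) chunk_size) == l)))]
  rw [Bool.false_or, List.any_eq_true]
  constructor
  · rintro ⟨x, hmem, hp⟩
    rw [PySem.List.mem_pyRange_one] at hmem
    obtain ⟨hx1, hxn⟩ := hmem
    have hx0 : (0:Int) ≤ x := by omega
    set d := x.toNat with hd
    have hxd : x = (d : Int) := (Int.toNat_of_nonneg hx0).symm
    rw [Bool.and_eq_true, beq_iff_eq, beq_iff_eq] at hp
    obtain ⟨hmod, hrep⟩ := hp
    rw [PySem.Int.mod_eq_zero_iff_dvd, hxd] at hmod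
    refine ⟨d, by omega, by exact_mod_cast hxd ▸ hxn, Int.natCast_dvd_natCast.mp hmod, ?_⟩
    rw [hxd, PySem.List.slice_to _ (by omega), PySem.Int.floordiv_natCast] at hrep
    simpa [PySem.List.pyRepeat] using hrep
  · rintro ⟨d, hd0, hdn, hdvd, hrep⟩
    refine ⟨(d : Int), ?_, ?_⟩
    · rw [PySem.List.mem_pyRange_one]
      constructor <;> [exact_mod_cast hd0; exact_mod_cast hdn]
    · rw [Bool.and_eq_true, beq_iff_eq, beq_iff_eq]
      refine ⟨?_, ?_⟩
      · rw [PySem.Int.mod_eq_zero_iff_dvd]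
        exact_mod_cast hdvd
      · rw [PySem.List.slice_to _ (by omega), PySem.Int.floordiv_natCast]
        simpa [PySem.List.pyRepeat] using hrep

-- a prefix occurrence inside (l++l) at offset i ≤ |l| is rotation-invariance by i
lemma prefix_drop_iff_rotate (l : List Char) (i : Nat) (hi : i ≤ l.length) :
    l <+: (l ++ l).drop i ↔ l.rotate i = l := by
  have hX : (l ++ l).drop i = l.drop i ++ l := by
    rw [List.drop_append]
    congr 1
    rw [Nat.sub_eq_zero_of_le hi, List.drop_zero]
  have htake : ((l ++ l).drop i).take l.length = l.rotate i := by
    rw [hX, List.take_append, List.length_drop]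
    rw [List.take_of_length_le (by rw [List.length_drop]; omega), List.rotate_eq_drop_append_take hi]
    congr 2
    omega
  rw [List.prefix_iff_eq_take, htake, eq_comm]

-- B's substring search, characterised: some proper rotation fixes l
lemma portB_core (l : List Char) (hn0 : 0 < l.length) :
    PySem.Chars.isIn l (PySem.List.slice (l ++ l) (some 1) (some (-1))) = true ↔
      ∃ i : Nat, 0 < i ∧ i < l.length ∧ l.rotate i = l := by
  set n := l.length with hnn
  have ht : PySem.List.slice (l ++ l) (some 1) (some (-1)) = ((l ++ l).drop 1).take (2*n - 2) := by
    simp only [PySem.List.slice, PySem.List.clampIdx]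
    rw [if_neg (show ¬((1:Int) < 0) by decide), if_pos (show ((-1):Int) < 0 by decide),
        if_neg (show ¬(((l ++ l).length : Int) + (-1) < 0) by simp [List.length_append]; omega)]
    have e1 : min (1:Int).toNat (l ++ l).length = 1 := by
      simp [List.length_append]; omega
    have e2 : (((l ++ l).length : Int) + -1).toNat = 2 * n - 1 := by
      simp [List.length_append]; omega
    rw [e1, e2]
    congr 1
  rw [ht, ← PySem.Chars.exists_prefix_drop_iff_isIn]
  constructor
  · rintro ⟨j, hpre⟩
    rw [List.drop_take, List.drop_drop] at hpre
    rw [List.prefix_take_iff] at hpre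
    obtain ⟨hpre, hlen⟩ := hpre
    rw [prefix_drop_iff_rotate l (1+j) (by omega)] at hpre
    exact ⟨1+j, by omega, by omega, hpre⟩
  · rintro ⟨i, hi0, hin, hrot⟩
    refine ⟨i - 1, ?_⟩
    rw [List.drop_take, List.drop_drop, List.prefix_take_iff]
    rw [show 1 + (i - 1) = i by omega, prefix_drop_iff_rotate l i (by omega)]
    exact ⟨hrot, by omega⟩

lemma portB_iff (id : Int) :
    check_for_match_part2_alt id = true ↔
      ∃ i : Nat, 0 < i ∧ i < (PySem.Int.toChars id).length ∧
        (PySem.Int.toChars id).rotate i = PySem.Int.toChars id := by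
  have hn : 0 < (PySem.Int.toChars id).length := List.length_pos_of_ne_nil (toChars_ne_nil id)
  exact portB_core _ hn

-- ===== VERDICT (by name: the statement is the Claim_ definition above) =====
theorem check_for_match_part2_spec : Claim_equal_check_for_match_part2 := by
  intro id _
  unfold Spec_check_for_match_part2
  rw [Bool.eq_iff_iff, portA_iff, portB_iff]
  set l := PySem.Int.toChars id with hl
  constructor
  · rintro ⟨d, hd, hdn, hdvd, hrep⟩
    exact ⟨d, hd, hdn, rotate_of_rep l d hd (le_of_lt hdn) hdvd hrep⟩
  · rintro ⟨i, hi, hin, hrot⟩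
    refine ⟨Nat.gcd l.length i, Nat.gcd_pos_of_pos_right _ hi, ?_, Nat.gcd_dvd_left _ _, ?_⟩
    · exact lt_of_le_of_lt (Nat.gcd_le_right _ hi) hin
    · exact rep_of_rotate l _ (Nat.gcd_pos_of_pos_right _ hi) (Nat.gcd_dvd_left _ _)
        (rotate_gcd l i hi hin hrot)
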